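-- pv_equiv track=rewrite | github.com/DDRnJn/FundamentalsOfBioinformatics | hw7.py | sharedKmers
-- ===== SOURCE A (Python) =====
-- def reverseComplement(pattern):
--
--     newPattern = ""
--     for i in range(len(pattern)):
--         if pattern[i] == "A":
--             newPattern += "T"
--         elif pattern[i] == "T":
--             newPattern += "A"
--         elif pattern[i] == "C":
--             newPattern += "G"
--         else:
--             newPattern += "C"
--     newPattern = newPattern[::-1]
--     return newPattern
--
-- def patternGen(text, k):
--
--     patterns = []
--     for i in range(0, len(text)-k+1):
--         patterns += [text[i:(k+i)]]
--     return patterns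
--
-- def sharedKmers(k, str1, str2):
--
--     kmers = []
--     str1Kmers = patternGen(str1, k)
--     str2Kmers = patternGen(str2, k)
--     kmerDict = {}
--     for i in range(len(str1Kmers)):
--         kmerDict[str1Kmers[i]] = []
--     for i in range(len(str1Kmers)):
--         kmerDict[str1Kmers[i]] = kmerDict[str1Kmers[i]] + [i]
--     for i in range(len(str2Kmers)):
--         if str2Kmers[i] in kmerDict:
--             newKmers = [(j,i) for j in kmerDict[str2Kmers[i]]]
--             kmers += newKmers
--         elif reverseComplement(str2Kmers[i]) in kmerDict:
--             newKmers = [(j,i) for j in kmerDict[reverseComplement(str2Kmers[i])]]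
--             kmers += newKmers
--     return kmers
-- ===== SOURCE B (Python) =====
-- # B: drops A's position-indexed dict; nested repeated scans of str1 per str2 k-mer,
-- # with the reverse-complement scan only when the exact scan finds nothing (same
-- # precedence as A's elif). Objective: alternative decomposition, not faster.
--
-- _RC = {'A': 'T', 'T': 'A', 'C': 'G'}
--
-- def reverseComplement(pattern):
--     return ''.join(_RC.get(c, 'C') for c in reversed(pattern))
--
-- def sharedKmers(k, str1, str2):
--     out = []
--     n1 = len(str1) - k + 1
--     for i in range(len(str2) - k + 1):
--         s2 = str2[i:i+k]
--         exact = [(j, i) for j in range(n1) if str1[j:j+k] == s2]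
--         if exact:
--             out += exact
--         else:
--             rc = reverseComplement(s2)
--             out += [(j, i) for j in range(n1) if str1[j:j+k] == rc]
--     return out
-- ===== Notes on version B (the rewrite author's own statement) =====
-- stated objective: alternative
-- what changed: B drops A's position-indexed dict of str1 k-mers and instead, for each str2 k-mer, rescans str1 directly (exact-match scan, then a reverse-complement scan only when the exact scan found nothing, matching A's elif precedence).
import Mathlib
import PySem

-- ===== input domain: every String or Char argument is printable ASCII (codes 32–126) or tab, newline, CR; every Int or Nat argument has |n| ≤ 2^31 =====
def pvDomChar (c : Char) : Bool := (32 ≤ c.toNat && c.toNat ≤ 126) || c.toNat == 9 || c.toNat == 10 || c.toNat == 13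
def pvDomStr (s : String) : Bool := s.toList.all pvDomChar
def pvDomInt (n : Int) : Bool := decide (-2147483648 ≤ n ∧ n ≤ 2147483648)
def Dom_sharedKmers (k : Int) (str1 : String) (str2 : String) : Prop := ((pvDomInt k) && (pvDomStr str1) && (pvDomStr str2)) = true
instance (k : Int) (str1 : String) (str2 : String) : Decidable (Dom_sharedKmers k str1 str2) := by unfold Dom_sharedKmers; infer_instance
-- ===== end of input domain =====

-- B replaces A's position-indexed dict of str1 k-mers by direct per-k-mer rescans of str1;
-- equivalence of the RETURN value is proved for all inputs (both functions are total).

-- ===== PORT A =====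


-- A's per-character complement branch chain (A/T/C/else→C), in A's branch order
def rcCharA (c : Char) : Char :=
  if c = 'A' then 'T' else if c = 'T' then 'A' else if c = 'C' then 'G' else 'C'

-- reverseComplement: loop i in range(len(pattern)) appending, then [::-1] (= reverse)
def reverseComplementA (pattern : List Char) : List Char :=
  ((PySem.List.pyRange 0 (pattern.length : Int) 1).foldl
    (fun acc i => acc ++ [rcCharA (PySem.List.pyGetD pattern i ' ')]) []).reverse

-- patternGen: loop i in range(0, len(text)-k+1) appending text[i:(k+i)]
def patternGenA (text : List Char) (k : Int) : List (List Char) :=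
  (PySem.List.pyRange 0 ((text.length : Int) - k + 1) 1).foldl
    (fun acc i => acc ++ [PySem.List.slice text (some i) (some (k + i))]) []

-- sharedKmers: dict from str1 k-mer to its ascending position list, then scan str2 k-mers;
-- kmerDict[x] is only read at keys the first loop created, so getD is exact there
def sharedKmers (k : Int) (str1 : String) (str2 : String) : List (Int × Int) :=
  let str1Kmers := patternGenA str1.toList k
  let str2Kmers := patternGenA str2.toList k
  let d0 : PySem.Dict (List Char) (List Int) :=
    (PySem.List.pyRange 0 (str1Kmers.length : Int) 1).foldl
      (fun d i => d.insert (PySem.List.pyGetD str1Kmers i []) []) PySem.Dict.empty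
  let d :=
    (PySem.List.pyRange 0 (str1Kmers.length : Int) 1).foldl
      (fun d i => d.insert (PySem.List.pyGetD str1Kmers i [])
        (d.getD (PySem.List.pyGetD str1Kmers i []) [] ++ [i])) d0
  (PySem.List.pyRange 0 (str2Kmers.length : Int) 1).foldl
    (fun kmers i =>
      let w := PySem.List.pyGetD str2Kmers i []
      if d.contains w then kmers ++ (d.getD w []).map (fun j => (j, i))
      else if d.contains (reverseComplementA w) then
        kmers ++ (d.getD (reverseComplementA w) []).map (fun j => (j, i))
      else kmers) []

-- ===== PORT B =====

-- B's complement table {'A':'T','T':'A','C':'G'} with .get(c, 'C')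
def rcDictB : PySem.Dict Char Char := PySem.Dict.ofList [('A', 'T'), ('T', 'A'), ('C', 'G')]

-- ''.join(_RC.get(c, 'C') for c in reversed(pattern))
def reverseComplementB (pattern : List Char) : List Char :=
  pattern.reverse.map (fun c => rcDictB.getD c 'C')

def sharedKmers_alt (k : Int) (str1 : String) (str2 : String) : List (Int × Int) :=
  let t1 := str1.toList
  let t2 := str2.toList
  let n1 : Int := (t1.length : Int) - k + 1
  (PySem.List.pyRange 0 ((t2.length : Int) - k + 1) 1).foldl
    (fun out i =>
      let s2 := PySem.List.slice t2 (some i) (some (i + k))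
      let exact := ((PySem.List.pyRange 0 n1 1).filter
          (fun j => PySem.List.slice t1 (some j) (some (j + k)) == s2)).map (fun j => (j, i))
      if exact = [] then
        let rc := reverseComplementB s2
        out ++ ((PySem.List.pyRange 0 n1 1).filter
          (fun j => PySem.List.slice t1 (some j) (some (j + k)) == rc)).map (fun j => (j, i))
      else out ++ exact) []

-- ===== PRECONDITION & SPEC =====
def Spec_sharedKmers (k : Int) (str1 : String) (str2 : String) (out : List (Int × Int)) : Prop := out = sharedKmers_alt k str1 str2
instance (k : Int) (str1 : String) (str2 : String) (out : List (Int × Int)) : Decidable (Spec_sharedKmers k str1 str2 out) := by unfold Spec_sharedKmers; infer_instance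

-- ===== CLAIM (what is proved, stated in full; the proofs are below) =====
def Claim_equal_sharedKmers : Prop := ∀ (k : Int) (str1 : String) (str2 : String), Dom_sharedKmers k str1 str2 → Spec_sharedKmers k str1 str2 (sharedKmers k str1 str2)

-- ===== LEMMAS AND PROOFS =====

theorem rcDictB_getD (c : Char) : rcDictB.getD c 'C' = (if c = 'A' then 'T' else if c = 'T' then 'A' else if c = 'C' then 'G' else 'C') := by
  have h : rcDictB = PySem.Dict.mk [('A', 'T'), ('T', 'A'), ('C', 'G')] := by decide
  rw [h]
  simp [PySem.Dict.getD_eq_get?_getD, PySem.Dict.get?_mk_cons]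
  split_ifs <;> simp_all [eq_comm, PySem.Dict.get?]

-- pyRange toNat lemma

theorem pyRange_toNat (b : Int) : PySem.List.pyRange 0 ((b.toNat : Int)) 1 = PySem.List.pyRange 0 b 1 := by
  rcases le_or_gt b 0 with hb | hb
  · rw [PySem.List.pyRange_one_eq_nil (by omega), PySem.List.pyRange_one_eq_nil hb]
  · rw [Int.toNat_of_nonneg (le_of_lt hb)]

theorem rc_eq (w : List Char) : reverseComplementA w = reverseComplementB w := by
  unfold reverseComplementA reverseComplementB
  rw [PySem.List.foldl_pyRange_zero_pyGetD' w ' ' (fun acc c => acc ++ [rcCharA c]) []]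
  rw [PySem.List.foldl_append_singleton_eq_map]
  simp [List.map_reverse, rcDictB_getD, rcCharA]

-- first loop

theorem dict0_getD (L : List (List Char)) (d : PySem.Dict (List Char) (List Int))
    (hd : ∀ w, d.getD w [] = []) (w : List Char) :
    (L.foldl (fun d x => d.insert x ([] : List Int)) d).getD w [] = [] := by
  induction L generalizing d with
  | nil => exact hd w
  | cons x L ih =>
      simp only [List.foldl_cons]
      refine ih _ (fun w' => ?_)
      rw [PySem.Dict.getD_insert]
      split <;> simp [hd]

theorem dict0_contains (L : List (List Char)) (d : PySem.Dict (List Char) (List Int)) (w : List Char) :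
    (L.foldl (fun d x => d.insert x ([] : List Int)) d).contains w
      = (d.contains w || decide (w ∈ L)) := by
  induction L generalizing d with
  | nil => simp
  | cons x L ih =>
      simp only [List.foldl_cons, ih, PySem.Dict.contains_insert, List.mem_cons]
      by_cases h : w = x <;> simp [h, Bool.or_comm, Bool.or_left_comm]

-- second loop

theorem dict2_getD (l : List (Int × List Char)) (d : PySem.Dict (List Char) (List Int)) (w : List Char) :
    (l.foldl (fun d p => d.insert p.2 (d.getD p.2 [] ++ [p.1])) d).getD w []
      = d.getD w [] ++ (l.filter (fun p => p.2 == w)).map (·.1) := by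
  induction l generalizing d with
  | nil => simp
  | cons p l ih =>
      simp only [List.foldl_cons, ih, List.filter_cons]
      by_cases h : p.2 = w
      · simp [h]
      · rw [PySem.Dict.getD_insert]; simp [Ne.symm h, beq_iff_eq, h]

theorem dict2_contains (l : List (Int × List Char)) (d : PySem.Dict (List Char) (List Int)) (w : List Char) :
    (l.foldl (fun d p => d.insert p.2 (d.getD p.2 [] ++ [p.1])) d).contains w
      = (d.contains w || l.any (fun p => p.2 == w)) := by
  induction l generalizing d with
  | nil => simp
  | cons p l ih =>
      simp only [List.foldl_cons, ih, PySem.Dict.contains_insert, List.any_cons]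
      by_cases h : w = p.2
      · simp [h, Bool.or_comm]
      · rw [show ((w == p.2) = false) from by simp [h], show ((p.2 == w) = false) from by simp [Ne.symm h]]
        simp

theorem patternGenA_eq (t : List Char) (k : Int) :
    patternGenA t k = (PySem.List.pyRange 0 ((t.length : Int) - k + 1) 1).map
      (fun i => PySem.List.slice t (some i) (some (k + i))) := by
  unfold patternGenA
  rw [PySem.List.foldl_append_singleton_eq_map]
  simp

theorem range_patternGen (t : List Char) (k : Int) :
    PySem.List.pyRange 0 ((patternGenA t k).length : Int) 1
      = PySem.List.pyRange 0 ((t.length : Int) - k + 1) 1 := by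
  rw [patternGenA_eq, List.length_map, PySem.List.length_pyRange_one]
  rw [show (t.length : Int) - k + 1 - 0 = (t.length : Int) - k + 1 by ring]
  exact pyRange_toNat _

theorem enum_patternGen (t : List Char) (k : Int) :
    (PySem.List.pyRange 0 ((patternGenA t k).length : Int) 1).map
        (fun i => (i, PySem.List.pyGetD (patternGenA t k) i ([] : List Char)))
      = (PySem.List.pyRange 0 ((t.length : Int) - k + 1) 1).map
          (fun j => (j, PySem.List.slice t (some j) (some (k + j)))) := by
  rw [range_patternGen]
  refine List.map_congr_left (fun j hj => ?_)
  rw [PySem.List.mem_pyRange_one] at hj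
  rw [patternGenA_eq, PySem.List.pyGetD_map_pyRange_of_nonneg _ _ _ _ (by omega) (by omega)]

theorem pairs_filter (r : List Int) (g : Int → List Char) (w : List Char) :
    ((r.map (fun i => (i, g i))).filter (fun p => p.2 == w)).map (·.1)
      = r.filter (fun j => g j == w) := by
  rw [List.filter_map, List.map_map]
  simp [Function.comp_def]

theorem pairs_any (r : List Int) (g : Int → List Char) (w : List Char) :
    (r.map (fun i => (i, g i))).any (fun p => p.2 == w) = r.any (fun j => g j == w) := by
  rw [List.any_map]; rfl

theorem foldl_pair {kappa nu : Type} (r : List Int) (f : Int → kappa) (step : nu → (Int × kappa) → nu) (d : nu) :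
    r.foldl (fun d i => step d (i, f i)) d = (r.map (fun i => (i, f i))).foldl step d := by
  rw [List.foldl_map]

theorem dfinal_getD (k : Int) (t1 : List Char) (w : List Char) :
    ((PySem.List.pyRange 0 ((patternGenA t1 k).length : Int) 1).foldl
      (fun d i => d.insert (PySem.List.pyGetD (patternGenA t1 k) i [])
        (d.getD (PySem.List.pyGetD (patternGenA t1 k) i []) [] ++ [i]))
      ((PySem.List.pyRange 0 ((patternGenA t1 k).length : Int) 1).foldl
        (fun d i => d.insert (PySem.List.pyGetD (patternGenA t1 k) i []) []) PySem.Dict.empty)).getD w []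
    = (PySem.List.pyRange 0 ((t1.length : Int) - k + 1) 1).filter
        (fun j => PySem.List.slice t1 (some j) (some (k + j)) == w) := by
  rw [foldl_pair (PySem.List.pyRange 0 ((patternGenA t1 k).length : Int) 1)
        (fun j => PySem.List.pyGetD (patternGenA t1 k) j [])
        (fun (d : PySem.Dict (List Char) (List Int)) (p : Int × List Char) =>
          d.insert p.2 (d.getD p.2 [] ++ [p.1])) _]
  rw [PySem.List.foldl_pyRange_zero_pyGetD' (patternGenA t1 k) []
        (fun (d : PySem.Dict (List Char) (List Int)) w => d.insert w []) PySem.Dict.empty]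
  rw [dict2_getD, dict0_getD _ _ (fun w' => by simp [PySem.Dict.getD_empty]), enum_patternGen,
      pairs_filter]
  simp

theorem dfinal_contains (k : Int) (t1 : List Char) (w : List Char) :
    ((PySem.List.pyRange 0 ((patternGenA t1 k).length : Int) 1).foldl
      (fun d i => d.insert (PySem.List.pyGetD (patternGenA t1 k) i [])
        (d.getD (PySem.List.pyGetD (patternGenA t1 k) i []) [] ++ [i]))
      ((PySem.List.pyRange 0 ((patternGenA t1 k).length : Int) 1).foldl
        (fun d i => d.insert (PySem.List.pyGetD (patternGenA t1 k) i []) []) PySem.Dict.empty)).contains w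
    = (PySem.List.pyRange 0 ((t1.length : Int) - k + 1) 1).any
        (fun j => PySem.List.slice t1 (some j) (some (k + j)) == w) := by
  rw [foldl_pair (PySem.List.pyRange 0 ((patternGenA t1 k).length : Int) 1)
        (fun j => PySem.List.pyGetD (patternGenA t1 k) j [])
        (fun (d : PySem.Dict (List Char) (List Int)) (p : Int × List Char) =>
          d.insert p.2 (d.getD p.2 [] ++ [p.1])) _]
  rw [PySem.List.foldl_pyRange_zero_pyGetD' (patternGenA t1 k) []
        (fun (d : PySem.Dict (List Char) (List Int)) w => d.insert w []) PySem.Dict.empty]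
  rw [dict2_contains, dict0_contains, enum_patternGen, pairs_any]
  rw [PySem.Dict.contains_empty]
  by_cases h : w ∈ patternGenA t1 k
  · simp only [h, decide_true, Bool.false_or, Bool.true_or]
    symm
    rw [List.any_eq_true]
    rw [patternGenA_eq] at h
    obtain ⟨j, hj, hw⟩ := List.mem_map.mp h
    exact ⟨j, hj, by simp [hw]⟩
  · simp only [h, decide_false, Bool.false_or]

theorem main_eq (k : Int) (str1 str2 : String) : sharedKmers k str1 str2 = sharedKmers_alt k str1 str2 := by
  unfold sharedKmers sharedKmers_alt
  simp only []
  have hadd : ∀ (t : List Char) (j : Int),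
      PySem.List.slice t (some j) (some (j + k)) = PySem.List.slice t (some j) (some (k + j)) := by
    intro t j; rw [Int.add_comm]
  simp only [hadd]
  rw [range_patternGen str2.toList k]
  refine PySem.List.foldl_congr_mem _ _ _ _ (fun acc i hi => ?_)
  rw [PySem.List.mem_pyRange_one] at hi
  have hw : PySem.List.pyGetD (patternGenA str2.toList k) i []
      = PySem.List.slice str2.toList (some i) (some (k + i)) := by
    rw [patternGenA_eq, PySem.List.pyGetD_map_pyRange_of_nonneg _ _ _ _ (by omega) (by omega)]
  simp only [hw]
  set w := PySem.List.slice str2.toList (some i) (some (k + i)) with hwdef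
  rw [dfinal_contains, dfinal_getD, dfinal_contains, dfinal_getD, rc_eq]
  set r1 := PySem.List.pyRange 0 ((str1.toList.length : Int) - k + 1) 1 with hr1
  by_cases h1 : r1.any (fun j => PySem.List.slice str1.toList (some j) (some (k + j)) == w)
  · have hne : (r1.filter (fun j => PySem.List.slice str1.toList (some j) (some (k + j)) == w)).map
        (fun j => ((j : Int), i)) ≠ [] := by
      simp only [ne_eq, List.map_eq_nil_iff, List.filter_eq_nil_iff]
      rw [List.any_eq_true] at h1
      obtain ⟨j, hj, hp⟩ := h1
      exact fun hall => by simpa [hp] using hall j hj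
    simp [h1, hne]
  · have hnil : r1.filter (fun j => PySem.List.slice str1.toList (some j) (some (k + j)) == w) = [] := by
      rw [List.filter_eq_nil_iff]
      rw [Bool.not_eq_true, List.any_eq_false] at h1
      exact fun j hj => by simpa using h1 j hj
    by_cases h2 : r1.any (fun j => PySem.List.slice str1.toList (some j) (some (k + j)) == reverseComplementB w)
    · simp [h1, h2, hnil]
    · have hnil2 : r1.filter (fun j => PySem.List.slice str1.toList (some j) (some (k + j)) == reverseComplementB w) = [] := by
        rw [List.filter_eq_nil_iff]
        rw [Bool.not_eq_true, List.any_eq_false] at h2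
        exact fun j hj => by simpa using h2 j hj
      simp [h1, h2, hnil, hnil2]

-- ===== VERDICT (by name: the statement is the Claim_ definition above) =====
theorem sharedKmers_spec : Claim_equal_sharedKmers := by
  intro k str1 str2 _
  unfold Spec_sharedKmers
  exact main_eq k str1 str2
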